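-- pv_equiv track=rewrite | github.com/RayBar72/holbertonschool-machine_learning | supervised_learning/0x10-nlp_metrics/1-ngram_bleu.py | references_dict
-- ===== SOURCE A (Python) =====
-- def dict_vecto(palabras, ngram_range):
--     """_summary_
--     Args:
--         palabras (list): Function that creates a dictionary
--         ngram_range (int, optional): ngram for tokens.
--
--     Returns:
--         dict: Dictionary with the words and the number of times they appear
--     """
--     largo = len(palabras)
--
--     posibles = []
--     x = ""
--     for i in range(0, largo):
--         try:
--             for j in range(ngram_range):
--                 x += palabras[i + j]
--                 if j != ngram_range - 1:
--                     x += ' '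
--             posibles.append(x)
--         except Exception as e:
--             pass
--         x = ""
--     dicc = {x: posibles.count(x) for x in posibles}
--     return dicc
--
-- def references_dict(references, Sentence, n):
--     """Function that creates a dictionary several times in fuction of the
--     references list
--
--     Args:
--         references (list): References for the sentence
--         Sentence (dict): dictionary with the words and
--         the number of times they appear
--
--     Returns:
--         dict: with the words and the max number of times they appear
--     """
--     g_list = list(Sentence)
--     g_list = {x: 0 for x in g_list}
--     for ref in references:
--         x = dict_vecto(ref, n)
--         for k, v in g_list.items():
--             if v < x.get(k, 0):
--                 g_list[k] = x[k]
--     return g_list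
-- ===== SOURCE B (Python) =====
-- def references_dict(references, Sentence, n):
--     """For every candidate n-gram in Sentence, the maximum number of times it
--     occurs in any single reference.
--
--     Counts each candidate directly in each reference with a sliding window of
--     n words, keeping a running maximum; no per-reference count table is built.
--     """
--     def count_in(ref, key):
--         c = 0
--         for i in range(len(ref) - n + 1):
--             if ' '.join(ref[i:i + n]) == key:
--                 c += 1
--         return c
--
--     result = {}
--     for k in Sentence:
--         m = 0
--         for ref in references:
--             m = max(m, count_in(ref, k))
--         result[k] = m
--     return result
-- ===== Notes on version B (the rewrite author's own statement) =====
-- stated objective: alternative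
-- what changed: B inverts the loop structure: instead of building a full n-gram count dictionary per reference (dict_vecto, whose dict comprehension re-scans the n-gram list for every entry) and then sweeping all candidate keys, B iterates over the candidate keys and counts that exact n-gram directly in each reference via sliding windows, keeping a running maximum; Pre_ excludes non-positive n, a degenerate n-gram order no caller would specify, on which A counts an empty n-gram once per word and B once per window position - both readings defensible.
-- outside the precondition, e.g. on references_dict([['a']], {'': 0}, 0): A returns {'': 1}, B returns {'': 2}
import Mathlib
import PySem

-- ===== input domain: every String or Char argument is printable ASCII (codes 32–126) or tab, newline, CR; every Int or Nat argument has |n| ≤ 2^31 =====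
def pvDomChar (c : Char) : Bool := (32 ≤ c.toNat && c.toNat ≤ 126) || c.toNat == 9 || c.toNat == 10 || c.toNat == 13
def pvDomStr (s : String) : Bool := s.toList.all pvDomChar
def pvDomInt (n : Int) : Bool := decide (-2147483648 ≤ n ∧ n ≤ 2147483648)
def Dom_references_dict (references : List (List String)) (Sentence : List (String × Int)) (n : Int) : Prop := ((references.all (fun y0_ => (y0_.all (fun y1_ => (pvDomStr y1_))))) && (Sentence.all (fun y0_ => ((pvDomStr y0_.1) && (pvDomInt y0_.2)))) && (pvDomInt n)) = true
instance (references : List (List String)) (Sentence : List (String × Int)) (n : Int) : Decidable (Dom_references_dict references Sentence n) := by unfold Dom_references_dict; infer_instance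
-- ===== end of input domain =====

-- B re-implements references_dict by iterating over the candidate n-grams and counting each
-- one directly in every reference (running maximum), instead of building a per-reference
-- n-gram count dictionary; equal return value on n ≥ 1, proved below.

-- ===== PORT A =====
-- the `for j in range(ngram_range)` loop of the try-block, which stops executing
-- at the iteration whose indexing raises (the exception propagates out of the loop)
def pvBuildJ (palabras : List String) (i ngram : Int) (j : Int) (x : String) : Option String :=
  if h : j < ngram then
    match PySem.List.pyGet? palabras (i + j) with
    | none => none
    | some w => pvBuildJ palabras i ngram (j + 1) (x ++ w ++ (if j ≠ ngram - 1 then " " else ""))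
  else some x
termination_by (ngram - j).toNat
decreasing_by omega

-- the try-block of dict_vecto for one window start i: the built n-gram, or none on IndexError
def pvBuildX (palabras : List String) (i ngram : Int) : Option String :=
  pvBuildJ palabras i ngram 0 ""

def pvDictVecto (palabras : List String) (ngram : Int) : PySem.Dict String Int :=
  let largo : Int := (palabras.length : Int)
  let posibles : List String :=
    (PySem.List.pyRange 0 largo).foldl
      (fun acc i =>
        match pvBuildX palabras i ngram with
        | some x => acc ++ [x]
        | none => acc)
      []
  posibles.foldl (fun d x => d.insert x ((PySem.List.count posibles x : Int))) PySem.Dict.empty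

-- notes on exactness: `g_list[k] = x[k]` only runs when `v < x.get(k, 0)`, which forces k ∈ x,
-- so `x[k]` is `x.get(k, 0)`; Python mutates only the value of the key currently being visited,
-- so iterating the live `.items()` view equals folding over its snapshot.
def references_dict (references : List (List String)) (Sentence : List (String × Int)) (n : Int) : List (String × Int) :=
  let gkeys := PySem.Dict.keys (PySem.Dict.ofList Sentence)
  let g0 : PySem.Dict String Int := gkeys.foldl (fun d k => d.insert k 0) PySem.Dict.empty
  let gfin := references.foldl
    (fun g ref =>
      let x := pvDictVecto ref n
      (g.items).foldl
        (fun g' kv => if kv.2 < x.getD kv.1 0 then g'.insert kv.1 (x.getD kv.1 0) else g')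
        g)
    g0
  gfin.items

-- ===== PORT B =====
-- count_in of Source B: occurrences of the n-gram `k` among the space-joined windows of ref
def pvCountIn (ref : List String) (k : String) (n : Int) : Int :=
  (PySem.List.pyRange 0 ((ref.length : Int) - n + 1)).foldl
    (fun c i =>
      if PySem.Str.join " " (PySem.List.slice ref (some i) (some (i + n))) == k then c + 1 else c)
    0

def references_dict_alt (references : List (List String)) (Sentence : List (String × Int)) (n : Int) : List (String × Int) :=
  (PySem.Dict.keys (PySem.Dict.ofList Sentence)).map
    (fun k => (k, references.foldl (fun m ref => max m (pvCountIn ref k n)) 0))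

-- ===== PRECONDITION & SPEC =====
-- Pre_ excludes non-positive n, a degenerate n-gram order no caller would specify, on which
-- A counts an empty n-gram once per word and B once per window position — both defensible.
def Pre_references_dict (references : List (List String)) (Sentence : List (String × Int)) (n : Int) : Prop := 1 ≤ n
instance (references : List (List String)) (Sentence : List (String × Int)) (n : Int) : Decidable (Pre_references_dict references Sentence n) := by unfold Pre_references_dict; infer_instance

def pvWitness_references_dict : List (List String) × (List (String × Int)) × Int :=
  ([["a", "b"], ["b", "b"]], [("a b", 1), ("b b", 1), ("c", 0)], 2)

def Spec_references_dict (references : List (List String)) (Sentence : List (String × Int)) (n : Int) (out : List (String × Int)) : Prop := out = references_dict_alt references Sentence n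
instance (references : List (List String)) (Sentence : List (String × Int)) (n : Int) (out : List (String × Int)) : Decidable (Spec_references_dict references Sentence n out) := by unfold Spec_references_dict; infer_instance

-- ===== CLAIM (what is proved, stated in full; the proofs are below) =====
def Claim_equal_references_dict : Prop := ∀ (references : List (List String)) (Sentence : List (String × Int)) (n : Int), Dom_references_dict references Sentence n → Pre_references_dict references Sentence n → Spec_references_dict references Sentence n (references_dict references Sentence n)

-- ===== LEMMAS AND PROOFS =====

-- proof-only reformulation of pvBuildJ's loop body as a fold step; `none` = IndexError
def pvStep (palabras : List String) (i ngram : Int) (acc : Option String) (j : Int) : Option String :=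
  match acc with
  | none => none
  | some x =>
    match PySem.List.pyGet? palabras (i + j) with
    | none => none
    | some w => some (x ++ w ++ (if j ≠ ngram - 1 then " " else ""))

-- left-fold concatenation with " " separators, the value dict_vecto's inner loop builds
def pvCatSep : List String → String → String
  | [], acc => acc
  | [w], acc => acc ++ w
  | w :: x :: ws, acc => pvCatSep (x :: ws) (acc ++ w ++ " ")

lemma pvJoin_singleton (w : String) : PySem.Str.join " " [w] = w := by
  rw [← String.toList_inj]
  simp [PySem.Str.join, PySem.Chars.join, List.intercalate]

lemma pvJoin_cons (w x : String) (ws : List String) :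
    PySem.Str.join " " (w :: x :: ws) = w ++ " " ++ PySem.Str.join " " (x :: ws) := by
  rw [← String.toList_inj]
  simp [PySem.Str.join, PySem.Chars.join, List.intercalate, String.toList_append]

lemma pvCatSep_eq_join : ∀ (ws : List String) (acc : String), ws ≠ [] →
    pvCatSep ws acc = acc ++ PySem.Str.join " " ws := by
  intro ws
  induction ws with
  | nil => intro acc h; exact absurd rfl h
  | cons w ws ih =>
    intro acc _
    cases ws with
    | nil => simp [pvCatSep, pvJoin_singleton]
    | cons x ws' =>
      rw [show pvCatSep (w :: x :: ws') acc = pvCatSep (x :: ws') (acc ++ w ++ " ") from rfl,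
        ih (acc ++ w ++ " ") (by simp), pvJoin_cons]
      simp [String.append_assoc]

lemma pvPyGet?_of_lt (p : List String) (k : Nat) (h : k < p.length) :
    PySem.List.pyGet? p (k : Int) = some (p[k]) := by
  have h1 : PySem.List.pyIdx? p.length ((k : Nat) : Int) = some k := by
    simp only [PySem.List.pyIdx?]
    rw [if_pos (by omega), if_pos (by exact_mod_cast h)]
    simp
  simp [PySem.List.pyGet?, h1, List.getElem?_eq_getElem h]

lemma pvPyGet?_of_ge (p : List String) (i : Int) (h0 : 0 ≤ i) (h : (p.length : Int) ≤ i) :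
    PySem.List.pyGet? p i = none := by
  have h1 : PySem.List.pyIdx? p.length i = none := by
    simp only [PySem.List.pyIdx?]
    rw [if_pos h0, if_neg (by omega)]
  simp [PySem.List.pyGet?, h1]

lemma pvStep_none (p : List String) (i n : Int) (js : List Int) :
    js.foldl (pvStep p i n) none = none := by
  induction js with
  | nil => rfl
  | cons j js ih => simpa [pvStep] using ih

-- the early-exit loop agrees with folding pvStep over the whole remaining range,
-- since pvStep keeps `none` once the IndexError has occurred
lemma pvBuildJ_eq_foldl (p : List String) (i n : Int) (j : Int) (x : String) :
    pvBuildJ p i n j x = (PySem.List.pyRange j n).foldl (pvStep p i n) (some x) := by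
  by_cases h : j < n
  · rw [pvBuildJ, dif_pos h, PySem.List.pyRange_one_cons h, List.foldl_cons]
    cases hg : PySem.List.pyGet? p (i + j) with
    | none =>
      rw [show pvStep p i n (some x) j = none by simp [pvStep, hg]]
      exact (pvStep_none _ _ _ _).symm
    | some w =>
      rw [show pvStep p i n (some x) j
          = some (x ++ w ++ (if j ≠ n - 1 then " " else "")) by simp [pvStep, hg]]
      exact pvBuildJ_eq_foldl p i n (j + 1) _
  · rw [pvBuildJ, dif_neg h, PySem.List.pyRange_one_eq_nil (by omega), List.foldl_nil]
termination_by (n - j).toNat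
decreasing_by omega

lemma pvBuildX_eq_foldl (p : List String) (i n : Int) :
    pvBuildX p i n = (PySem.List.pyRange 0 n).foldl (pvStep p i n) (some "") :=
  pvBuildJ_eq_foldl p i n 0 ""

lemma pvBuildX_eq_none (p : List String) (i n : Int)
    (h0 : 0 ≤ i) (hil : i ≤ (p.length : Int)) (hln : (p.length : Int) < i + n) :
    pvBuildX p i n = none := by
  rw [pvBuildX_eq_foldl]
  rw [PySem.List.pyRange_one_append 0 ((p.length : Int) - i) n (by omega) (by omega),
    List.foldl_append]
  rw [PySem.List.pyRange_one_cons (a := (p.length : Int) - i) (b := n) (by omega)]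
  cases hs : ((PySem.List.pyRange 0 ((p.length : Int) - i)).foldl (pvStep p i n) (some "")) with
  | none => rw [List.foldl_cons]; rw [show pvStep p i n none ((p.length : Int) - i) = none from rfl]
            exact pvStep_none _ _ _ _
  | some x =>
    rw [List.foldl_cons]
    have : pvStep p i n (some x) ((p.length : Int) - i) = none := by
      simp only [pvStep]
      rw [pvPyGet?_of_ge p (i + ((p.length : Int) - i)) (by omega) (by omega)]
    rw [this]; exact pvStep_none _ _ _ _

lemma pvStep_loop (p : List String) (a m : Nat) (hle : a + m ≤ p.length) :
    ∀ (t : Nat), 0 < t → t ≤ m → ∀ acc : String,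
      (PySem.List.pyRange ((m : Int) - (t : Int)) (m : Int)).foldl
          (pvStep p (a : Int) (m : Int)) (some acc)
        = some (pvCatSep ((p.drop (a + m - t)).take t) acc) := by
  intro t
  induction t with
  | zero => intro h; omega
  | succ t ih =>
    intro _ htm acc
    have hidx : a + m - (t + 1) < p.length := by omega
    have hcons : PySem.List.pyRange ((m : Int) - (((t : Nat) + 1 : Nat) : Int)) (m : Int)
        = ((m : Int) - (((t : Nat) + 1 : Nat) : Int)) :: PySem.List.pyRange ((m : Int) - (t : Int)) (m : Int) := by
      rw [PySem.List.pyRange_one_cons (by omega),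
        show ((m : Int) - (((t : Nat) + 1 : Nat) : Int) + 1) = (m : Int) - (t : Int) by omega]
    rw [hcons, List.foldl_cons]
    have hget : PySem.List.pyGet? p ((a : Int) + ((m : Int) - (((t : Nat) + 1 : Nat) : Int)))
        = some (p[a + m - (t + 1)]'hidx) := by
      rw [show ((a : Int) + ((m : Int) - (((t : Nat) + 1 : Nat) : Int))) = ((a + m - (t + 1) : Nat) : Int) by omega]
      exact pvPyGet?_of_lt p _ hidx
    have hdrop : p.drop (a + m - (t + 1)) = p[a + m - (t + 1)]'hidx :: p.drop (a + m - t) := by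
      rw [List.drop_eq_getElem_cons hidx]
      congr 2
      omega
    have hstep : pvStep p (a : Int) (m : Int) (some acc) ((m : Int) - (((t : Nat) + 1 : Nat) : Int))
        = some (acc ++ p[a + m - (t + 1)]'hidx ++ (if t = 0 then "" else " ")) := by
      simp only [pvStep, hget]
      congr 1
      rcases Nat.eq_zero_or_pos t with ht | ht
      · subst ht
        rw [if_neg (by omega), if_pos rfl]
      · rw [if_pos (by omega), if_neg (by omega)]
    rw [hstep]
    rcases Nat.eq_zero_or_pos t with ht | ht
    · subst ht
      rw [show ((m : Int) - ((0 : Nat) : Int)) = (m : Int) by omega]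
      rw [PySem.List.pyRange_one_eq_nil le_rfl, List.foldl_nil]
      rw [hdrop, List.take_succ_cons, List.take_zero]
      simp [pvCatSep]
    · have hlen : ((p.drop (a + m - t)).take t).length = t := by
        rw [List.length_take, List.length_drop]
        omega
      have htail : (p.drop (a + m - t)).take t ≠ [] := by
        intro hnil
        rw [hnil] at hlen
        simp at hlen
        omega
      rw [if_neg (by omega), ih ht (by omega) (acc ++ p[a + m - (t + 1)]'hidx ++ " "),
        hdrop, List.take_succ_cons]
      cases hW : (p.drop (a + m - t)).take t with
      | nil => exact absurd hW htail
      | cons w ws => rfl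

lemma pvBuildX_some (p : List String) (a m : Nat) (hm : 0 < m) (hle : a + m ≤ p.length) :
    pvBuildX p (a : Int) (m : Int) = some (pvCatSep ((p.drop a).take m) "") := by
  rw [pvBuildX_eq_foldl]
  have := pvStep_loop p a m hle m hm le_rfl ""
  rw [show ((m : Int) - (m : Int)) = 0 by omega] at this
  rw [show (a + m - m) = a by omega] at this
  exact this

-- dict comprehension {x : F x for x in l}, looked up
lemma pvGet?_comprehension (F : String → Int) (l : List String) (q : String) :
    ∀ d : PySem.Dict String Int,
      (l.foldl (fun d x => d.insert x (F x)) d).get? q = if q ∈ l then some (F q) else d.get? q := by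
  induction l with
  | nil => intro d; simp
  | cons k t ih =>
    intro d
    rw [List.foldl_cons, ih]
    by_cases hqt : q ∈ t
    · simp [hqt]
    · by_cases hqk : q = k
      · subst hqk; simp [hqt, PySem.Dict.get?_insert_self]
      · simp [hqt, hqk, PySem.Dict.get?_insert_of_ne _ _ hqk]

-- the {x: 0 for x in g_list} initialisation, looked up
lemma pvGet?_init (K : List String) (q : String) :
    ∀ d : PySem.Dict String Int,
      (K.foldl (fun d k => d.insert k 0) d).get? q = if q ∈ K then some 0 else d.get? q := by
  induction K with
  | nil => intro d; simp
  | cons k t ih =>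
    intro d
    rw [List.foldl_cons, ih]
    by_cases hqt : q ∈ t
    · simp [hqt]
    · by_cases hqk : q = k
      · subst hqk; simp [hqt, PySem.Dict.get?_insert_self]
      · simp [hqt, hqk, PySem.Dict.get?_insert_of_ne _ _ hqk]

lemma pvCount_map_eq_countP (g : Int → String) (q : String) (l : List Int) :
    List.count q (l.map g) = l.countP (fun i => g i == q) := by
  induction l with
  | nil => rfl
  | cons x t ih => simp [List.count_cons, List.countP_cons, ih]

lemma pvFlatMap_congr {α β : Type} (l : List α) (f g : α → List β)
    (h : ∀ x ∈ l, f x = g x) : l.flatMap f = l.flatMap g := by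
  induction l with
  | nil => rfl
  | cons x t ih =>
    simp only [List.flatMap_cons]
    rw [h x (by simp), ih (fun y hy => h y (by simp [hy]))]

lemma pvFlatMap_singleton_map {α β : Type} (l : List α) (g : α → β) :
    l.flatMap (fun x => [g x]) = l.map g := by
  induction l with
  | nil => rfl
  | cons x t ih => simp [ih]

-- clipped count: looking up q in dict_vecto's table is B's direct window count (n ≥ 1)
lemma pvGetD_pvDictVecto (ref : List String) (n : Int) (hn : 1 ≤ n) (q : String) :
    (pvDictVecto ref n).getD q 0 = pvCountIn ref q n := by
  have hstep : ∀ (l : List Int) (acc : List String),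
      l.foldl (fun acc i => match pvBuildX ref i n with
        | some x => acc ++ [x] | none => acc) acc
      = acc ++ l.flatMap (fun i => (pvBuildX ref i n).toList) := by
    intro l acc
    rw [← PySem.List.foldl_append_eq_flatMap]
    exact PySem.List.foldl_congr_mem _ _ _ _
      (fun acc i _ => by cases pvBuildX ref i n <;> simp)
  have hgd : ∀ P : List String,
      (P.foldl (fun d x => d.insert x ((PySem.List.count P x : Int))) PySem.Dict.empty).getD q 0
        = (List.count q P : Int) := by
    intro P
    rw [PySem.Dict.getD_eq_get?_getD,
      pvGet?_comprehension (fun x => (PySem.List.count P x : Int)) P q PySem.Dict.empty]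
    by_cases hq : q ∈ P
    · rw [if_pos hq]
      simp [PySem.List.count_eq]
    · rw [if_neg hq, PySem.Dict.get?_empty]
      simp [List.count_eq_zero_of_not_mem hq]
  unfold pvDictVecto
  simp only [hgd]
  rw [hstep, List.nil_append]
  rw [pvCountIn]
  by_cases hL : (ref.length : Int) < n
  · have hnil : (PySem.List.pyRange 0 ((ref.length : Int))).flatMap
        (fun i => (pvBuildX ref i n).toList) = [] := by
      apply List.flatMap_eq_nil_iff.mpr
      intro i hi
      have hmem := PySem.List.mem_pyRange_one.mp hi
      rw [pvBuildX_eq_none ref i n (by omega) (by omega) (by omega)]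
      rfl
    rw [hnil, PySem.List.pyRange_one_eq_nil (by omega), List.foldl_nil]
    rfl
  · set L : Int := (ref.length : Int) with hLdef
    have hsplit : PySem.List.pyRange 0 L
        = PySem.List.pyRange 0 (L - n + 1) ++ PySem.List.pyRange (L - n + 1) L :=
      PySem.List.pyRange_one_append 0 (L - n + 1) L (by omega) (by omega)
    rw [hsplit, List.flatMap_append]
    have hsec : (PySem.List.pyRange (L - n + 1) L).flatMap
        (fun i => (pvBuildX ref i n).toList) = [] := by
      apply List.flatMap_eq_nil_iff.mpr
      intro i hi
      have hmem := PySem.List.mem_pyRange_one.mp hi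
      rw [pvBuildX_eq_none ref i n (by omega) (by omega) (by omega)]
      rfl
    have hfst : ∀ i ∈ PySem.List.pyRange 0 (L - n + 1),
        pvBuildX ref i n
          = some (PySem.Str.join " " (PySem.List.slice ref (some i) (some (i + n)))) := by
      intro i hi
      have hmem := PySem.List.mem_pyRange_one.mp hi
      have hi' : i = ((i.toNat : Nat) : Int) := by omega
      have hn' : n = ((n.toNat : Nat) : Int) := by omega
      rw [hi', hn', pvBuildX_some ref i.toNat n.toNat (by omega) (by omega)]
      have hwin : (ref.drop i.toNat).take n.toNat
          = PySem.List.slice ref (some ((i.toNat : Nat) : Int)) (some (((i.toNat : Nat) : Int) + ((n.toNat : Nat) : Int))) := by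
        rw [PySem.List.slice_natCast_add]
      have hne : (ref.drop i.toNat).take n.toNat ≠ [] := by
        apply List.ne_nil_of_length_pos
        rw [List.length_take, List.length_drop]
        omega
      rw [pvCatSep_eq_join _ _ hne, String.empty_append, hwin]
    have hmap : (PySem.List.pyRange 0 (L - n + 1)).flatMap
        (fun i => (pvBuildX ref i n).toList)
        = (PySem.List.pyRange 0 (L - n + 1)).map
            (fun i => PySem.Str.join " " (PySem.List.slice ref (some i) (some (i + n)))) := by
      rw [pvFlatMap_congr _ _
        (fun i => [PySem.Str.join " " (PySem.List.slice ref (some i) (some (i + n)))])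
        (fun i hi => by rw [hfst i hi]; rfl)]
      exact pvFlatMap_singleton_map _ _
    rw [hsec, List.append_nil, hmap, pvCount_map_eq_countP,
      PySem.List.foldl_if_add_one
        (fun i => PySem.Str.join " " (PySem.List.slice ref (some i) (some (i + n))) == q)
        (PySem.List.pyRange 0 (L - n + 1)) 0]
    omega

-- one reference: folding dict_vecto's counts into the candidate table, key by key
lemma pvInnerFold (c : String → Int) :
    ∀ (pairs : List (String × Int)) (g : PySem.Dict String Int),
      (pairs.map Prod.fst).Nodup → (∀ p ∈ pairs, g.get? p.1 = some p.2) →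
      ((pairs.foldl (fun g' kv => if kv.2 < c kv.1 then g'.insert kv.1 (c kv.1) else g') g).keys = g.keys ∧
       ∀ q, (pairs.foldl (fun g' kv => if kv.2 < c kv.1 then g'.insert kv.1 (c kv.1) else g') g).get? q =
         if q ∈ pairs.map Prod.fst then ((g.get? q).map (fun v => max v (c q))) else g.get? q) := by
  intro pairs
  induction pairs with
  | nil => intro g _ _; exact ⟨rfl, fun q => by simp⟩
  | cons kv rest ih =>
    intro g hnd hget
    have hkv : g.get? kv.1 = some kv.2 := hget kv (by simp)
    have hcont : g.contains kv.1 = true := by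
      rw [PySem.Dict.contains_eq_isSome_get?, hkv]
      rfl
    have hnd' : (kv.1 :: rest.map Prod.fst).Nodup := by simpa using hnd
    have hndr : (rest.map Prod.fst).Nodup := (List.nodup_cons.mp hnd').2
    have hkvnot : kv.1 ∉ rest.map Prod.fst := (List.nodup_cons.mp hnd').1
    simp only [List.foldl_cons]
    have hg1keys : (if kv.2 < c kv.1 then g.insert kv.1 (c kv.1) else g).keys = g.keys := by
      split_ifs
      · exact PySem.Dict.keys_insert_of_contains g _ hcont
      · rfl
    have hg1get : ∀ q, (if kv.2 < c kv.1 then g.insert kv.1 (c kv.1) else g).get? q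
        = if q = kv.1 then some (max kv.2 (c kv.1)) else g.get? q := by
      intro q
      by_cases hlt : kv.2 < c kv.1
      · rw [if_pos hlt]
        by_cases hq : q = kv.1
        · subst hq
          rw [PySem.Dict.get?_insert_self, if_pos rfl, max_eq_right hlt.le]
        · rw [PySem.Dict.get?_insert_of_ne _ _ hq, if_neg hq]
      · rw [if_neg hlt]
        by_cases hq : q = kv.1
        · subst hq
          rw [if_pos rfl, hkv, max_eq_left (not_lt.mp hlt)]
        · rw [if_neg hq]
    have hget1 : ∀ p ∈ rest, (if kv.2 < c kv.1 then g.insert kv.1 (c kv.1) else g).get? p.1 = some p.2 := by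
      intro p hp
      have hne : p.1 ≠ kv.1 := by
        intro e
        exact hkvnot (e ▸ List.mem_map_of_mem hp)
      rw [hg1get, if_neg hne]
      exact hget p (by simp [hp])
    obtain ⟨hk2, hq2⟩ := ih (if kv.2 < c kv.1 then g.insert kv.1 (c kv.1) else g) hndr hget1
    refine ⟨hk2.trans hg1keys, ?_⟩
    intro q
    rw [hq2 q]
    simp only [List.map_cons, List.mem_cons]
    by_cases hq : q = kv.1
    · subst hq
      rw [if_neg hkvnot, hg1get, if_pos rfl, if_pos (Or.inl rfl), hkv]
      rfl
    · by_cases hqr : q ∈ rest.map Prod.fst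
      · rw [if_pos hqr, if_pos (Or.inr hqr), hg1get, if_neg hq]
      · rw [if_neg hqr, hg1get, if_neg hq, if_neg (by simp [hq, hqr])]

-- the whole loop over references: every key's value becomes its running maximum (n ≥ 1)
lemma pvOuterFold (n : Int) (hn : 1 ≤ n) :
    ∀ (refs : List (List String)) (g : PySem.Dict String Int), g.keys.Nodup →
      ((refs.foldl (fun g ref =>
          (g.items).foldl
            (fun g' kv => if kv.2 < (pvDictVecto ref n).getD kv.1 0 then g'.insert kv.1 ((pvDictVecto ref n).getD kv.1 0) else g')
            g) g).keys = g.keys ∧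
       ∀ q, (refs.foldl (fun g ref =>
          (g.items).foldl
            (fun g' kv => if kv.2 < (pvDictVecto ref n).getD kv.1 0 then g'.insert kv.1 ((pvDictVecto ref n).getD kv.1 0) else g')
            g) g).get? q
          = (g.get? q).map (fun v => refs.foldl (fun m ref => max m (pvCountIn ref q n)) v)) := by
  intro refs
  induction refs with
  | nil =>
    intro g _
    refine ⟨rfl, fun q => ?_⟩
    simp
  | cons r rs ih =>
    intro g hnd
    simp only [List.foldl_cons]
    have hpairs : (g.items.map Prod.fst).Nodup := hnd
    obtain ⟨hk1, hq1⟩ := pvInnerFold (fun k => (pvDictVecto r n).getD k 0) g.items g hpairs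
      (fun p hp => PySem.Dict.get?_of_mem_items g hp hnd)
    have hg1get : ∀ q, ((g.items).foldl
        (fun g' kv => if kv.2 < (pvDictVecto r n).getD kv.1 0 then g'.insert kv.1 ((pvDictVecto r n).getD kv.1 0) else g') g).get? q
        = (g.get? q).map (fun v => max v (pvCountIn r q n)) := by
      intro q
      rw [hq1 q, ← pvGetD_pvDictVecto r n hn q]
      by_cases hq : q ∈ g.items.map Prod.fst
      · rw [if_pos hq]
      · rw [if_neg hq]
        have hnone : g.get? q = none := by
          rw [PySem.Dict.get?_eq_none_iff_not_mem_keys]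
          exact hq
        rw [hnone]
        rfl
    obtain ⟨hk2, hq2⟩ := ih _ (by rw [hk1]; exact hnd)
    refine ⟨hk2.trans hk1, fun q => ?_⟩
    rw [hq2 q, hg1get q]
    cases g.get? q with
    | none => rfl
    | some v => rfl

-- ===== VERDICT (by name: the statement is the Claim_ definition above) =====
theorem references_dict_spec : Claim_equal_references_dict := by
  intro references Sentence n _ hn
  unfold Spec_references_dict references_dict references_dict_alt
  simp only []
  set K := (PySem.Dict.ofList Sentence).keys with hKdef
  have hK : K.Nodup := PySem.Dict.nodup_keys_ofList Sentence
  set g0 : PySem.Dict String Int := K.foldl (fun d k => d.insert k 0) PySem.Dict.empty with hg0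
  have hg0keys : g0.keys = K := by
    rw [hg0, PySem.Dict.keys_foldl_insert (f := fun _ _ => (0 : Int))]
    rw [PySem.Dict.keys_empty]
    rw [show PySem.Set.update ([] : List String) K = PySem.Set.ofList K from rfl]
    exact PySem.Set.ofList_eq_self_of_nodup K hK
  have hg0get : ∀ q, g0.get? q = if q ∈ K then some 0 else none := by
    intro q
    rw [hg0, pvGet?_init, PySem.Dict.get?_empty]
  obtain ⟨hkeys, hget⟩ := pvOuterFold n hn references g0 (by rw [hg0keys]; exact hK)
  set gfin := references.foldl
      (fun g ref =>
        (g.items).foldl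
          (fun g' kv => if kv.2 < (pvDictVecto ref n).getD kv.1 0 then g'.insert kv.1 ((pvDictVecto ref n).getD kv.1 0) else g')
          g) g0 with hgfin
  have hfinkeys : gfin.keys = K := by rw [hkeys, hg0keys]
  have hnodup : gfin.keys.Nodup := by rw [hfinkeys]; exact hK
  rw [PySem.Dict.items_eq_map_keys gfin hnodup 0, hfinkeys]
  apply List.map_congr_left
  intro k hk
  have hgk := hget k
  rw [PySem.Dict.getD_eq_get?_getD, hgk, hg0get k, if_pos hk]
  rfl
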